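-- pv_equiv track=rewrite | github.com/modrzejewski/mbe-automation | src/mbe_automation/calculators/azff/typing_rules.py | _match_available
-- ===== SOURCE A (Python) =====
-- def _match_available(preferred_type: str, all_types: set) -> str:
--     """
--     If the preferred FF_* type exists in the FF file, return it.
--     Otherwise, pick a fallback of the same element family.
--
--     This ensures robustness when FF files include only a subset
--     of the standard type library.
--     """
--     if preferred_type in all_types:
--         return preferred_type
--
--     # Fallback: choose the lowest-numbered type as last resort
--     numeric = sorted(
--         (int(t.split("_")[1]), t) for t in all_types if t.startswith("FF_")
--     )
--     if numeric:
--         return numeric[0][1]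
--
--     raise RuntimeError("No FF_* atom types available in the force-field file.")
-- ===== SOURCE B (Python) =====
-- def _match_available(preferred_type: str, all_types: set) -> str:
--     """
--     If the preferred FF_* type exists in the FF file, return it.
--     Otherwise, pick a fallback of the same element family.
--     """
--     if preferred_type in all_types:
--         return preferred_type
--
--     # Fallback: single pass tracking the lowest (number, name) key; no list, no sort.
--     best = None
--     for t in all_types:
--         if t.startswith("FF_"):
--             key = (int(t.split("_")[1]), t)
--             if best is None or key < best:
--                 best = key
--     if best is None:
--         raise RuntimeError("No FF_* atom types available in the force-field file.")
--     return best[1]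
-- ===== Notes on version B (the rewrite author's own statement) =====
-- stated objective: faster
-- what changed: Replaces A's build-a-list-then-full-sort fallback with a single pass over the set that tracks the running minimum (number, name) key in an accumulator, never materialising or sorting the candidate list.
import Mathlib
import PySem

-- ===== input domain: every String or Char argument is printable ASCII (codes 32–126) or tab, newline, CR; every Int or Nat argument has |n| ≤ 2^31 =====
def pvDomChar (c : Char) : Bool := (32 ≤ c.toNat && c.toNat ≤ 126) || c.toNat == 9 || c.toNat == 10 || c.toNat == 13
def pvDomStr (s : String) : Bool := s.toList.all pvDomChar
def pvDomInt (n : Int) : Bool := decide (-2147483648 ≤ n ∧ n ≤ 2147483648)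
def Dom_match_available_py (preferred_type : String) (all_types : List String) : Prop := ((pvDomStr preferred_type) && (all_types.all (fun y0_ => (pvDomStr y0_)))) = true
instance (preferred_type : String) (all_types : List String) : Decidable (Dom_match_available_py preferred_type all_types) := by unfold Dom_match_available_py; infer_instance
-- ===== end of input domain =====

-- B replaces A's build-then-sort fallback by a single running-minimum pass (no list, no sort);
-- the return value is proved identical wherever the Python A returns.

-- ===== PORT A =====
-- the (int(t.split("_")[1]), t) sort/min key both Pythons compute
-- (where Python's int() raises, PySem.Int.ofStr? is none; such inputs are outside Pre_)
def pvKey (t : String) : Int × String :=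
  ((PySem.Int.ofStr? (((PySem.Str.split? t "_").getD []).getD 1 "")).getD 0, t)

def match_available_py (preferred_type : String) (all_types : List String) : String :=
  if preferred_type ∈ all_types then preferred_type
  else
    -- numeric = sorted((int(t.split("_")[1]), t) for t in all_types if t.startswith("FF_"))
    -- (where Python's int() raises, PySem.Int.ofStr? is none; such inputs are outside Pre_)
    let numeric := PySem.List.sorted2
      (all_types.filterMap (fun t =>
        if PySem.Str.startswith t "FF_" then
          some (pvKey t)
        else none))
      Prod.fst Prod.snd
    match numeric with
    | p :: _ => p.2
    | [] => ""   -- Python raises RuntimeError here; excluded by Pre_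

-- ===== PORT B =====
def match_available_py_alt (preferred_type : String) (all_types : List String) : String :=
  if preferred_type ∈ all_types then preferred_type
  else
    match all_types.foldl (fun best t =>
      if PySem.Str.startswith t "FF_" then
        let k : Int × String := pvKey t
        match best with
        | none => some k
        | some b => if k.1 < b.1 ∨ (k.1 = b.1 ∧ k.2 < b.2) then some k else some b
      else best) none with
    | some b => b.2
    | none => ""   -- Python raises RuntimeError here; excluded by Pre_

-- ===== PRECONDITION & SPEC =====
-- Pre_ excludes exactly the inputs where the Python A raises: the preferred type is absent and
-- either no "FF_"-prefixed type exists (RuntimeError) or some "FF_" type's second "_"-field is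
-- not a Python int literal (ValueError).
def Pre_match_available_py (preferred_type : String) (all_types : List String) : Prop :=
  preferred_type ∈ all_types ∨
    ((∃ t ∈ all_types, PySem.Str.startswith t "FF_" = true) ∧
     ∀ t ∈ all_types, PySem.Str.startswith t "FF_" = true →
       (PySem.Int.ofStr? (((PySem.Str.split? t "_").getD []).getD 1 "")).isSome = true)
instance (preferred_type : String) (all_types : List String) : Decidable (Pre_match_available_py preferred_type all_types) := by unfold Pre_match_available_py; infer_instance
def pvWitness_match_available_py : String × List String := ("FF_2", ["FF_9", "FF_3"])
def Spec_match_available_py (preferred_type : String) (all_types : List String) (out : String) : Prop := out = match_available_py_alt preferred_type all_types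
instance (preferred_type : String) (all_types : List String) (out : String) : Decidable (Spec_match_available_py preferred_type all_types out) := by unfold Spec_match_available_py; infer_instance

-- ===== CLAIM (what is proved, stated in full; the proofs are below) =====
def Claim_equal_match_available_py : Prop := ∀ (preferred_type : String) (all_types : List String), Dom_match_available_py preferred_type all_types → Pre_match_available_py preferred_type all_types → Spec_match_available_py preferred_type all_types (match_available_py preferred_type all_types)

-- ===== LEMMAS AND PROOFS =====

-- B's running-minimum step, on the already-extracted (number, name) keys
def pvStep (best : Option (Int × String)) (k : Int × String) : Option (Int × String) :=
  match best with
  | none => some k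
  | some b => if k.1 < b.1 ∨ (k.1 = b.1 ∧ k.2 < b.2) then some k else some b

-- inserting one key into a list moves the head exactly as one pvStep moves the running minimum
lemma pv_head_insertBy (x : Int × String) (s : List (Int × String)) :
    (PySem.List.insertBy
      (fun a b : Int × String => decide (a.1 < b.1) || (!decide (b.1 < a.1) && decide (a.2.toList < b.2.toList)))
      x s).head? = pvStep s.head? x := by
  cases s with
  | nil => rfl
  | cons y ys =>
    simp only [PySem.List.insertBy, pvStep, List.head?_cons]
    by_cases h1 : x.1 < y.1
    · simp [h1]
    · by_cases h2 : y.1 < x.1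
      · have hne : ¬ (x.1 = y.1) := by omega
        simp [h1, h2, hne]
      · have heq : x.1 = y.1 := by omega
        by_cases h3 : x.2 < y.2 <;>
          simp [h1, h2, heq, ← String.lt_iff_toList_lt, h3]

-- the head of the insertion sort of l (started from s) is the running minimum over l
lemma pv_head_foldl_insertBy (l : List (Int × String)) (s : List (Int × String)) :
    (l.foldl (fun acc x => PySem.List.insertBy
      (fun a b : Int × String => decide (a.1 < b.1) || (!decide (b.1 < a.1) && decide (a.2.toList < b.2.toList)))
      x acc) s).head? = l.foldl pvStep s.head? := by
  induction l generalizing s with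
  | nil => rfl
  | cons x xs ih => simp only [List.foldl_cons, ih, pv_head_insertBy]

-- B's loop over all_types with the inline "FF_" filter is the pvStep fold over the extracted keys
lemma pv_b_fold (l : List String) (acc : Option (Int × String)) :
    l.foldl (fun best t =>
      if PySem.Str.startswith t "FF_" then
        let k : Int × String := pvKey t
        match best with
        | none => some k
        | some b => if k.1 < b.1 ∨ (k.1 = b.1 ∧ k.2 < b.2) then some k else some b
      else best) acc
    = (l.filterMap (fun t =>
        if PySem.Str.startswith t "FF_" then
          some (pvKey t)
        else none)).foldl pvStep acc := by
  induction l generalizing acc with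
  | nil => rfl
  | cons t ts ih =>
    simp only [List.foldl_cons, List.filterMap_cons]
    by_cases h : PySem.Str.startswith t "FF_" = true
    · rw [if_pos h, if_pos h, ih]
      rfl
    · rw [if_neg h, if_neg h]
      exact ih acc

-- ===== VERDICT (by name: the statement is the Claim_ definition above) =====
theorem match_available_py_spec : Claim_equal_match_available_py := by
  intro preferred_type all_types _ _
  unfold Spec_match_available_py match_available_py match_available_py_alt
  by_cases hmem : preferred_type ∈ all_types
  · simp [hmem]
  · rw [if_neg hmem, if_neg hmem, pv_b_fold]
    set cand := all_types.filterMap (fun t =>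
        if PySem.Str.startswith t "FF_" then
          some (pvKey t)
        else none) with hcand
    show (match PySem.List.sorted2 cand Prod.fst Prod.snd with
          | p :: _ => p.2
          | [] => "") = _
    have hhead : (PySem.List.sorted2 cand Prod.fst Prod.snd).head? = cand.foldl pvStep none := by
      have h := pv_head_foldl_insertBy cand []
      simpa [PySem.List.sorted2] using h
    cases hs : PySem.List.sorted2 cand Prod.fst Prod.snd with
    | nil =>
        rw [hs] at hhead
        simp only [List.head?_nil] at hhead
        rw [← hhead]
    | cons p ps =>
        rw [hs] at hhead
        simp only [List.head?_cons] at hhead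
        rw [← hhead]
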